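-- pv_equiv track=rewrite | github.com/AriadneBigheti/mc102 | labs/lab12.py | lista_quadro
-- ===== SOURCE A (Python) =====
-- def maior_numero(lista): #encontra o maior numero da lista
--     anterior=lista[0]
--     maior=anterior
--     if len(lista)!=1:
--         for i in range (len(lista)):
--             if lista[i]>maior:
--                 maior=lista[i]
--             anterior= lista[i]
--     return maior
--
-- def lista_quadro(lista): #tranforma uma lista numérica em quadro
--     largura=len(lista)+2
--     quadro=[]
--     linha_pontilhada=[]
--     for i in range(largura):
--         linha_pontilhada.append(".")
--     quadro.append(linha_pontilhada)
--
--     altura = maior_numero(lista)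
--     for x in range (0,altura): #linha do quadro que estamos lendo
--         linha = []
--         linha.append(".")
--         for i in range(len(lista)):
--             if lista[i]< (altura - x) :
--                 linha.append(" ")
--             else:
--                 linha.append("|")
--         linha.append(".")
--         quadro.append(linha)
--
--     quadro.append(linha_pontilhada)
--     return quadro
-- ===== SOURCE B (Python) =====
-- def lista_quadro(lista):  # column-per-value construction, then transpose into rows
--     altura = lista[0]
--     for v in lista[1:]:
--         if v > altura:
--             altura = v
--     cols = []
--     for v in lista:
--         c = max(0, min(v, altura))
--         cols.append([" "] * (altura - c) + ["|"] * c)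
--     dotted = ["."] * (len(lista) + 2)
--     rows = [["."] + [col[x] for col in cols] + ["."] for x in range(altura)]
--     return [dotted] + rows + [dotted]
-- ===== Notes on version B (the rewrite author's own statement) =====
-- stated objective: alternative
-- what changed: B builds one bar column per value (spaces on top, bars below, clamped) and transposes columns into rows, instead of A's row-outer loop re-comparing every value on every row; the dotted border and each middle row are produced by replication/comprehension rather than element-by-element appends.
import Mathlib
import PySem

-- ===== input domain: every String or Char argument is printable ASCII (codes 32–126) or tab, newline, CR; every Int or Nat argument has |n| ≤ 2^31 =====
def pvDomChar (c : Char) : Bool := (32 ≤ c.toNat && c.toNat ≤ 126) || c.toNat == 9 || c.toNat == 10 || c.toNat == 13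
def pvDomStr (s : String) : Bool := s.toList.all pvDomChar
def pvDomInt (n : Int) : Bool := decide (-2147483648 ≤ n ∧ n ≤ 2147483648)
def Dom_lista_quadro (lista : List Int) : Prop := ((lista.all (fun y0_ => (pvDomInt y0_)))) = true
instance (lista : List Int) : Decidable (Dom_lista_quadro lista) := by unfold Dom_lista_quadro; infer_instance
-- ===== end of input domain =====

-- B replaces A's row-outer/value-inner double loop by building one bar column per value and
-- transposing; same cost, different construction (objective: alternative).

-- ===== PORT A =====
-- helper of A: maior_numero(lista); 'anterior=lista[0]' raises IndexError on [] (excluded by Pre_),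
-- ported via pyGet? (none = IndexError; 0 returned there is never used under Pre_).
def maior_numero (lista : List Int) : Int :=
  match PySem.List.pyGet? lista 0 with
  | none => 0
  | some anterior0 =>
    if lista.length ≠ 1 then
      ((PySem.List.pyRange 0 (lista.length : Int) 1).foldl
        (fun (s : Int × Int) i =>
          ((if PySem.List.pyGetD lista i 0 > s.1 then PySem.List.pyGetD lista i 0 else s.1),
            PySem.List.pyGetD lista i 0))
        (anterior0, anterior0)).1
    else anterior0

def lista_quadro (lista : List Int) : List (List String) :=
  let largura := lista.length + 2
  let linha_pontilhada :=
    (PySem.List.pyRange 0 (largura : Int) 1).foldl (fun acc _ => acc ++ ["."]) []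
  let quadro : List (List String) := [] ++ [linha_pontilhada]
  let altura := maior_numero lista
  let quadro :=
    (PySem.List.pyRange 0 altura 1).foldl
      (fun q x =>
        let linha :=
          (PySem.List.pyRange 0 (lista.length : Int) 1).foldl
            (fun ln i =>
              ln ++ [if PySem.List.pyGetD lista i 0 < altura - x then " " else "|"])
            ["."]
        q ++ [linha ++ ["."]])
      quadro
  quadro ++ [linha_pontilhada]

-- ===== PORT B =====
def lista_quadro_alt (lista : List Int) : List (List String) :=
  -- altura = lista[0], updated over lista[1:]  (IndexError on [] excluded by Pre_)
  let altura := (lista.drop 1).foldl (fun m v => if v > m then v else m) (lista.headD 0)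
  let cols := lista.map (fun v =>
    let c := max 0 (min v altura)
    List.replicate (altura - c).toNat " " ++ List.replicate c.toNat "|")
  let dotted := List.replicate (lista.length + 2) "."
  let rows := (List.range altura.toNat).map
    (fun x => ["."] ++ cols.map (fun col => col.getD x " ") ++ ["."])
  [dotted] ++ rows ++ [dotted]

-- ===== PRECONDITION & SPEC =====
-- A raises IndexError on the empty list (lista[0] in maior_numero); excluded.
def Pre_lista_quadro (lista : List Int) : Prop := lista ≠ []
instance (lista : List Int) : Decidable (Pre_lista_quadro lista) := by
  unfold Pre_lista_quadro; infer_instance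
def pvWitness_lista_quadro : List Int := [2, 0, 3]

def Spec_lista_quadro (lista : List Int) (out : List (List String)) : Prop :=
  out = lista_quadro_alt lista
instance (lista : List Int) (out : List (List String)) : Decidable (Spec_lista_quadro lista out) := by
  unfold Spec_lista_quadro; infer_instance

-- ===== CLAIM (what is proved, stated in full; the proofs are below) =====
def Claim_equal_lista_quadro : Prop := ∀ (lista : List Int), Dom_lista_quadro lista → Pre_lista_quadro lista → Spec_lista_quadro lista (lista_quadro lista)

-- ===== LEMMAS AND PROOFS =====

-- B's running-max fold: every member is ≤ the result, and the seed is ≤ the result.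
def bmax (l : List Int) (m : Int) : Int := l.foldl (fun m v => if v > m then v else m) m

theorem le_bmax_seed (l : List Int) (m : Int) : m ≤ bmax l m := by
  induction l generalizing m with
  | nil => simp [bmax]
  | cons a t ih =>
    simp only [bmax, List.foldl_cons] at *
    exact le_trans (by split <;> omega) (ih _)

theorem mem_le_bmax (l : List Int) (m v : Int) (hv : v ∈ l) : v ≤ bmax l m := by
  induction l generalizing m with
  | nil => cases hv
  | cons a t ih =>
    simp only [bmax, List.foldl_cons] at *
    rcases List.mem_cons.mp hv with rfl | h
    · exact le_trans (by split <;> omega) (le_bmax_seed t _)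
    · exact ih _ h

-- first component of A's (maior, anterior) pair-fold: anterior is dead state
theorem fst_pair_foldl (l : List Int) (m a : Int) :
    (l.foldl (fun (s : Int × Int) v => ((if v > s.1 then v else s.1), v)) (m, a)).1
      = bmax l m := by
  induction l generalizing m a with
  | nil => simp [bmax]
  | cons b t ih => simp only [List.foldl_cons, bmax] at *; exact ih _ _

theorem maior_eq (a : Int) (t : List Int) :
    maior_numero (a :: t) = bmax t a := by
  have h0 : PySem.List.pyGet? (a :: t) 0 = some a := by
    simp [PySem.List.pyGet?, PySem.List.pyIdx?]
  unfold maior_numero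
  simp only [h0]
  by_cases h : t = []
  · subst h; simp [bmax]
  · have hlen : (a :: t).length ≠ 1 := by simpa using h
    rw [if_pos hlen]
    rw [PySem.List.foldl_pyRange_zero_pyGetD' (a :: t) 0
      (fun (s : Int × Int) v => ((if v > s.1 then v else s.1), v)) (a, a)]
    rw [fst_pair_foldl]
    simp [bmax]

-- the dotted border row
theorem dotted_eq (n : Nat) :
    (PySem.List.pyRange 0 (n : Int) 1).foldl (fun acc _ => acc ++ ["."]) ([] : List String)
      = List.replicate n "." := by
  have := PySem.List.foldl_append_singleton_eq_map
    (l := PySem.List.pyRange 0 (n : Int) 1) (f := fun _ => ".") (acc := ([] : List String))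
  simp only [this, List.nil_append, List.map_const']
  simp [PySem.List.length_pyRange_one]

-- one cell: B's column read at row x equals A's comparison
theorem cell_eq (altura v : Int) (x : Nat) (hv : v ≤ altura) (hx : (x : Int) < altura) :
    (List.replicate (altura - max 0 (min v altura)).toNat " "
      ++ List.replicate (max 0 (min v altura)).toNat "|").getD x " "
      = (if v < altura - (x : Int) then " " else "|") := by
  set c := max 0 (min v altura) with hc
  have h1 : (altura - c).toNat + c.toNat = altura.toNat := by omega
  rw [List.getD_eq_getElem?_getD]
  rcases Nat.lt_or_ge x (altura - c).toNat with h | h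
  · rw [List.getElem?_append_left (by simpa using h)]
    simp only [List.getElem?_replicate, if_pos h, Option.getD_some]
    rw [if_pos (by omega)]
  · rw [List.getElem?_append_right (by simpa using h)]
    simp only [List.length_replicate]
    have hx2 : x - (altura - c).toNat < c.toNat := by omega
    simp only [List.getElem?_replicate, if_pos hx2, Option.getD_some]
    rw [if_neg (by omega)]

-- one middle row of A, rewritten as ["."] ++ map ++ ["."]
theorem rowA_eq (lista : List Int) (altura x : Int) :
    (PySem.List.pyRange 0 (lista.length : Int) 1).foldl
        (fun ln i => ln ++ [if PySem.List.pyGetD lista i 0 < altura - x then " " else "|"]) ["."]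
      = ["."] ++ lista.map (fun v => if v < altura - x then " " else "|") := by
  rw [PySem.List.foldl_pyRange_zero_pyGetD' lista 0
    (fun ln v => ln ++ [if v < altura - x then " " else "|"]) ["."]]
  exact PySem.List.foldl_append_singleton_eq_map
    (fun v => if v < altura - x then " " else "|") lista ["."]

-- congruence for the bordered sandwich shape
theorem sandwich_congr {a : Type} (d : a) {X Y : List a} (h : X = Y) :
    [d] ++ (X ++ [d]) = [d] ++ (Y ++ [d]) := by rw [h]

-- the whole grid, for an arbitrary upper bound altura of the list
theorem grid_eq (l : List Int) (altura : Int) (hub : ∀ v ∈ l, v ≤ altura) :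
    ((PySem.List.pyRange 0 altura 1).foldl
        (fun q x => q ++
          [(PySem.List.pyRange 0 (l.length : Int) 1).foldl
              (fun ln i => ln ++ [if PySem.List.pyGetD l i 0 < altura - x then " " else "|"]) ["."]
            ++ ["."]])
        ([] ++ [(PySem.List.pyRange 0 ((l.length + 2 : Nat) : Int) 1).foldl
                  (fun acc _ => acc ++ ["."]) []]))
      ++ [(PySem.List.pyRange 0 ((l.length + 2 : Nat) : Int) 1).foldl
            (fun acc _ => acc ++ ["."]) []]
    = [List.replicate (l.length + 2) "."]
      ++ (List.range altura.toNat).map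
          (fun x => ["."] ++ (l.map (fun v =>
              List.replicate (altura - max 0 (min v altura)).toNat " "
                ++ List.replicate (max 0 (min v altura)).toNat "|")).map
              (fun col => col.getD x " ") ++ ["."])
      ++ [List.replicate (l.length + 2) "."] := by
  rw [dotted_eq (l.length + 2)]
  rw [List.nil_append]
  rw [PySem.List.foldl_append_singleton_eq_map
    (fun x =>
      (PySem.List.pyRange 0 (l.length : Int) 1).foldl
        (fun ln i => ln ++ [if PySem.List.pyGetD l i 0 < altura - x then " " else "|"])
        ["."] ++ ["."])
    (PySem.List.pyRange 0 altura 1) [List.replicate (l.length + 2) "."]]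
  rw [List.append_assoc]
  apply sandwich_congr
  rw [PySem.List.pyRange_one 0 altura]
  simp only [Int.sub_zero, List.map_map]
  apply List.map_congr_left
  intro x hx
  have hxlt : (x : Int) < altura := by
    have := List.mem_range.mp hx
    omega
  simp only [Function.comp_apply, zero_add]
  rw [rowA_eq l altura (x : Int)]
  simp only [List.append_assoc]
  apply sandwich_congr
  apply List.map_congr_left
  intro v hv
  simp only [Function.comp_apply]
  exact (cell_eq altura v x (hub v hv) hxlt).symm

-- ===== VERDICT (by name: the statement is the Claim_ definition above) =====
theorem lista_quadro_spec : Claim_equal_lista_quadro := by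
  intro lista _ hpre
  unfold Spec_lista_quadro
  obtain ⟨a, t, rfl⟩ : ∃ a t, lista = a :: t := by
    cases lista with
    | nil => exact absurd rfl hpre
    | cons a t => exact ⟨a, t, rfl⟩
  have hub : ∀ v ∈ a :: t, v ≤ bmax t a := by
    intro v hv
    rcases List.mem_cons.mp hv with rfl | hmem
    · exact le_bmax_seed t v
    · exact mem_le_bmax t a v hmem
  unfold lista_quadro lista_quadro_alt
  rw [maior_eq a t]
  exact grid_eq (a :: t) (bmax t a) hub
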